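-- pv_equiv track=rewrite | github.com/sravanneeli/Data-Structures-Algorithms | Interviewbit_Questions/Math/pairwise_hamming.py | get_bin
-- ===== SOURCE A (Python) =====
-- def get_bin(a):
--     i = 1 << 31
--     bits = []
--     while i > 0:
--         if a & i != 0:
--             bits.append(1)
--         else:
--             bits.append(0)
--         i //= 2
--
--     return bits
-- ===== SOURCE B (Python) =====
-- def get_bin(a):
--     return [int(c) for c in format(a & 0xFFFFFFFF, '032b')]
-- ===== Notes on version B (the rewrite author's own statement) =====
-- stated objective: idiomatic
-- what changed: Replaces the MSB-to-LSB shift/mask while-loop that appends into an accumulator with the standard-library idiom: format the low 32 bits as a '032b' binary string and map each character to an int.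
import Mathlib
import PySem

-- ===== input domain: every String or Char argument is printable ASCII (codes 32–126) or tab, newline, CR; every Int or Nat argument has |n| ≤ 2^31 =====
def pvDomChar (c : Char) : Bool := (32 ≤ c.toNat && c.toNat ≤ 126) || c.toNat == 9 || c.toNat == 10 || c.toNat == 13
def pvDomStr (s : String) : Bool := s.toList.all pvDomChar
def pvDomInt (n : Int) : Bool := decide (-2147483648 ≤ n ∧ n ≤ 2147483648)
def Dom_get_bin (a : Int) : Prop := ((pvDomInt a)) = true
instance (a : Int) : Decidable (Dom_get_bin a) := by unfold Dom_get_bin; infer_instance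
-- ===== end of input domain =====

-- B replaces A's MSB-to-LSB shift/mask while-loop by the idiomatic "format the low 32 bits
-- as an '032b' binary string, then map each character to an int"; same cost, no speed claim.


-- ===== PORT A =====
-- the while loop: i runs 2^31, 2^30, …, 1 (then 0 stops); each step appends 1 or 0
def getBinLoop (a : Int) (i : Int) (bits : List Int) : List Int :=
  if _h : 0 < i then
    getBinLoop a (PySem.Int.floordiv i 2)
      (bits ++ [if PySem.Int.band a i ≠ 0 then (1 : Int) else 0])
  else bits
termination_by i.toNat
decreasing_by
  have h2 : PySem.Int.floordiv i 2 = i / 2 := by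
    rw [PySem.Int.floordiv, Int.fdiv_eq_ediv]; simp
  simp only [h2]; omega

def get_bin (a : Int) : List Int :=
  getBinLoop a (1 <<< 31) []

-- ===== PORT B =====
-- format(n, '032b') for 0 ≤ n < 2^32: the 32 binary digits of n, MSB first.
-- Exact on that range: digit j of the zero-padded string is bit (31 - j) of n.
def format032b (n : Int) : List Char :=
  (List.range 32).map (fun j => if n.toNat.testBit (31 - j) then '1' else '0')

-- int(c) for the digit characters '0'/'1' produced by format032b (exact there)
def digitToInt (c : Char) : Int :=
  if c = '1' then 1 else 0

def get_bin_alt (a : Int) : List Int :=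
  (format032b (PySem.Int.band a 4294967295)).map digitToInt

-- ===== PRECONDITION & SPEC =====
def Spec_get_bin (a : Int) (out : List Int) : Prop := out = get_bin_alt a
instance (a : Int) (out : List Int) : Decidable (Spec_get_bin a out) := by unfold Spec_get_bin; infer_instance

-- ===== CLAIM (what is proved, stated in full; the proofs are below) =====
def Claim_equal_get_bin : Prop := ∀ (a : Int), Dom_get_bin a → Spec_get_bin a (get_bin a)

-- ===== LEMMAS AND PROOFS =====

-- Python's bit j of an arbitrary int (two's complement)
def pyBit (a : Int) (j : Nat) : Bool :=
  if 0 ≤ a then a.toNat.testBit j else !((-a - 1).toNat.testBit j)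

theorem band_two_pow_ne_zero (a : Int) (j : Nat) :
    (PySem.Int.band a ((2 ^ j : Nat) : Int) ≠ 0) ↔ pyBit a j = true := by
  rw [PySem.Int.band.eq_1, pyBit]
  have hb : (0 : Int) ≤ ((2 ^ j : Nat) : Int) := by positivity
  by_cases ha : 0 ≤ a
  · simp only [ha, hb, if_true, Int.toNat_natCast, Nat.and_two_pow]
    cases hbit : a.toNat.testBit j <;> simp
  · simp only [ha, hb, if_true, if_false, Int.toNat_natCast, Nat.two_pow_and]
    cases hbit : (-a - 1).toNat.testBit j <;> simp

theorem band_mask_testBit (a : Int) (j : Nat) (hj : j < 32) :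
    (PySem.Int.band a 4294967295).toNat.testBit j = pyBit a j := by
  rw [PySem.Int.band.eq_1, pyBit]
  have hb : ((0:Int) ≤ 4294967295) := by norm_num
  have hmask : ((4294967295 : Int)).toNat = 2 ^ 32 - 1 := by decide
  by_cases ha : 0 ≤ a
  · simp only [ha, hb, if_true, hmask, Int.toNat_natCast]
    rw [Nat.and_two_pow_sub_one_eq_mod, Nat.testBit_mod_two_pow]
    simp [hj]
  · simp only [ha, hb, if_true, if_false, hmask, Int.toNat_natCast]
    have h1 : (2 ^ 32 - 1) &&& (-a - 1).toNat = (-a - 1).toNat % 2 ^ 32 := by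
      rw [Nat.land_comm, Nat.and_two_pow_sub_one_eq_mod]
    rw [h1]
    have h2 : 2 ^ 32 - 1 - (-a - 1).toNat % 2 ^ 32
        = 2 ^ 32 - ((-a - 1).toNat % 2 ^ 32 + 1) := by omega
    rw [h2, Nat.testBit_two_pow_sub_succ (Nat.mod_lt _ (by norm_num)),
      Nat.testBit_mod_two_pow]
    simp [hj]

-- one bit of A's output, as an Int
def bitInt (a : Int) (j : Nat) : Int := if pyBit a j then 1 else 0

theorem floordiv_two_pow (k : Nat) :
    PySem.Int.floordiv ((2 ^ (k + 1) : Nat) : Int) 2 = ((2 ^ k : Nat) : Int) := by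
  have h : PySem.Int.floordiv ((2 ^ (k + 1) : Nat) : Int) 2
      = ((2 ^ (k + 1) : Nat) : Int) / 2 := by
    rw [PySem.Int.floordiv, Int.fdiv_eq_ediv]; simp
  rw [h, pow_succ]
  push_cast
  omega

theorem getBinLoop_zero (a : Int) (bits : List Int) : getBinLoop a 0 bits = bits := by
  rw [getBinLoop]; simp

theorem getBinLoop_spec (a : Int) (k : Nat) (bits : List Int) :
    getBinLoop a ((2 ^ k : Nat) : Int) bits
      = bits ++ (List.range (k + 1)).map (fun j => bitInt a (k - j)) := by
  induction k generalizing bits with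
  | zero =>
    rw [getBinLoop]
    have h1 : PySem.Int.floordiv ((2 ^ 0 : Nat) : Int) 2 = 0 := by decide
    simp only [h1, getBinLoop_zero]
    have hb := band_two_pow_ne_zero a 0
    have hpos : (0 : Int) < ((2 ^ 0 : Nat) : Int) := by norm_num
    simp only [hpos, dite_true]
    by_cases hbit : pyBit a 0 = true <;>
      simp_all [bitInt, List.range_succ]
  | succ k ih =>
    rw [getBinLoop]
    have hpos : (0 : Int) < ((2 ^ (k + 1) : Nat) : Int) := by positivity
    simp only [hpos, dite_true, floordiv_two_pow, ih]
    have hb := band_two_pow_ne_zero a (k + 1)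
    rw [List.append_assoc]
    congr 1
    rw [show List.range (k + 1 + 1) = 0 :: List.map Nat.succ (List.range (k + 1)) from List.range_succ_eq_map]
    simp only [List.map_cons, List.map_map, List.singleton_append, Nat.sub_zero]
    congr 1
    · by_cases hbit : pyBit a (k + 1) = true <;> simp_all [bitInt]
    · apply List.map_congr_left
      intro j hj
      simp only [Function.comp_apply]
      congr 1
      omega

theorem get_bin_eq (a : Int) :
    get_bin a = (List.range 32).map (fun j => bitInt a (31 - j)) := by
  rw [get_bin]
  have h : (1 <<< 31 : Int) = ((2 ^ 31 : Nat) : Int) := by decide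
  rw [h, getBinLoop_spec]
  rfl

theorem get_bin_alt_eq (a : Int) :
    get_bin_alt a = (List.range 32).map (fun j => bitInt a (31 - j)) := by
  rw [get_bin_alt, format032b, List.map_map]
  apply List.map_congr_left
  intro j hj
  have hj32 : 31 - j < 32 := by omega
  simp only [Function.comp_apply, bitInt]
  rw [band_mask_testBit a (31 - j) hj32]
  by_cases hbit : pyBit a (31 - j) = true <;> simp_all [digitToInt]

-- ===== VERDICT (by name: the statement is the Claim_ definition above) =====
theorem get_bin_spec : Claim_equal_get_bin := by
  intro a _
  unfold Spec_get_bin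
  rw [get_bin_eq, get_bin_alt_eq]
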